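-- pv_equiv track=rewrite | github.com/mtthdn/lacuene-exp | workers/benchmark_cue.py | make_gene_symbols
-- ===== SOURCE A (Python) =====
-- def make_gene_symbols(n: int) -> list[str]:
--     """Generate N fake gene symbols."""
--     # Use real-ish looking symbols
--     prefixes = ["BMP", "FGF", "SOX", "PAX", "WNT", "SHH", "TBX", "DLX",
--                 "MSX", "TWIST", "SNAI", "ZEB", "FOXD", "ALX", "ETS",
--                 "HAND", "TFAP", "EDN", "GJA", "COL", "MMP", "ADAM",
--                 "EPHB", "SEMA", "RUNX", "RARA", "IRF", "TP", "SMAD",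
--                 "NOG", "CHRD", "TGFB"]
--     symbols = []
--     for i in range(n):
--         prefix = prefixes[i % len(prefixes)]
--         num = (i // len(prefixes)) + 1
--         symbols.append(f"{prefix}{num}X")
--     return symbols
-- ===== SOURCE B (Python) =====
-- def make_gene_symbols(n: int) -> list[str]:
--     """Generate N fake gene symbols."""
--     prefixes = ["BMP", "FGF", "SOX", "PAX", "WNT", "SHH", "TBX", "DLX",
--                 "MSX", "TWIST", "SNAI", "ZEB", "FOXD", "ALX", "ETS",
--                 "HAND", "TFAP", "EDN", "GJA", "COL", "MMP", "ADAM",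
--                 "EPHB", "SEMA", "RUNX", "RARA", "IRF", "TP", "SMAD",
--                 "NOG", "CHRD", "TGFB"]
--     symbols = []
--     if n <= 0:
--         return symbols
--     num = 1
--     while True:
--         for prefix in prefixes:
--             symbols.append(f"{prefix}{num}X")
--             if len(symbols) >= n:
--                 return symbols
--         num += 1
-- ===== Notes on version B (the rewrite author's own statement) =====
-- stated objective: alternative
-- what changed: Replaced the flat indexed loop (computing i % len and i // len for every i in range(n)) with a nested enumeration: an outer round counter num and an inner loop directly over the prefixes list, breaking out as soon as n symbols have been produced; no modulo/division per element.
import Mathlib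
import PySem

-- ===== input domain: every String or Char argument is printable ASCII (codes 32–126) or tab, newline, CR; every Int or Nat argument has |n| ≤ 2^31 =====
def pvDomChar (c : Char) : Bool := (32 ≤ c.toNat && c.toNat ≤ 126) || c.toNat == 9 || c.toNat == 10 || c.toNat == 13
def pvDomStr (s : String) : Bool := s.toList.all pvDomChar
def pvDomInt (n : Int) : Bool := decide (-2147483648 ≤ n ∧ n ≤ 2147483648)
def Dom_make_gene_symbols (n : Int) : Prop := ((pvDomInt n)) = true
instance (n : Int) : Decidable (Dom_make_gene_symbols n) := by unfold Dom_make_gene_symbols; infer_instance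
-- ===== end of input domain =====

-- B replaces A's flat indexed loop (i % len, i // len per element) by a nested enumeration
-- over round numbers and the prefixes list with an early break (objective: alternative).

-- The shared prefixes literal (the same constant list appears in both Pythons).
def pvPrefixes : List String :=
  ["BMP", "FGF", "SOX", "PAX", "WNT", "SHH", "TBX", "DLX",
   "MSX", "TWIST", "SNAI", "ZEB", "FOXD", "ALX", "ETS",
   "HAND", "TFAP", "EDN", "GJA", "COL", "MMP", "ADAM",
   "EPHB", "SEMA", "RUNX", "RARA", "IRF", "TP", "SMAD",
   "NOG", "CHRD", "TGFB"]

-- ===== PORT A =====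
-- for i in range(n): symbols.append(prefixes[i % len] + str(i // len + 1) + "X")
-- (the index i % len is always in range, so Python's indexing never raises; .getD "" is dead)
def make_gene_symbols (n : Int) : List String :=
  (PySem.List.pyRange 0 n 1).foldl
    (fun symbols i =>
      let pre := (PySem.List.pyGet? pvPrefixes (PySem.Int.mod i (pvPrefixes.length : Int))).getD ""
      let num := PySem.Int.floordiv i (pvPrefixes.length : Int) + 1
      symbols ++ [pre ++ PySem.Int.toStr num ++ "X"]) []

-- ===== PORT B =====
-- inner 'for prefix in prefixes' loop: rem = number of symbols still to produce;
-- append prefix+str(num)+"X" each step, break (stop) when rem hits 0;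
-- returns the symbols produced this round and the remaining count.
def pvAltInner (num : Int) : List String → Nat → List String × Nat
  | _, 0 => ([], 0)
  | [], rem => ([], rem)
  | p :: ps, rem + 1 =>
      let pr := pvAltInner num ps rem
      ((p ++ PySem.Int.toStr num ++ "X") :: pr.1, pr.2)

theorem pvAltInner_snd (num : Int) (ps : List String) (rem : Nat) :
    (pvAltInner num ps rem).2 = rem - ps.length := by
  induction ps generalizing rem with
  | nil => cases rem <;> simp [pvAltInner]
  | cons p ps ih => cases rem <;> simp [pvAltInner, ih]

-- outer 'while True' loop: one round per num, until rem symbols have been produced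
def pvAltOuter (rem : Nat) (num : Int) : List String :=
  if rem = 0 then []
  else
    let pr := pvAltInner num pvPrefixes rem
    pr.1 ++ pvAltOuter pr.2 (num + 1)
termination_by rem
decreasing_by
  simp only [pvAltInner_snd]
  have : pvPrefixes.length = 32 := by decide
  omega

def make_gene_symbols_alt (n : Int) : List String :=
  if n ≤ 0 then [] else pvAltOuter n.toNat 1

-- ===== PRECONDITION & SPEC =====
def Spec_make_gene_symbols (n : Int) (out : List String) : Prop := out = make_gene_symbols_alt n
instance (n : Int) (out : List String) : Decidable (Spec_make_gene_symbols n out) := by unfold Spec_make_gene_symbols; infer_instance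

-- ===== CLAIM (what is proved, stated in full; the proofs are below) =====
def Claim_equal_make_gene_symbols : Prop := ∀ (n : Int), Dom_make_gene_symbols n → Spec_make_gene_symbols n (make_gene_symbols n)

-- ===== LEMMAS AND PROOFS =====

-- the common closed form: the i-th symbol of a run whose first round is numbered `num`
def pvF (num : Int) (i : Nat) : String :=
  (pvPrefixes[i % 32]?.getD "") ++ PySem.Int.toStr ((i / 32 : Nat) + num) ++ "X"

theorem pvA_closed (n : Int) :
    make_gene_symbols n = (List.range n.toNat).map (pvF 1) := by
  unfold make_gene_symbols
  rw [PySem.List.pyRange_one 0 n]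
  simp only [zero_add, sub_zero]
  rw [PySem.List.foldl_append_singleton_eq_map]
  simp only [List.map_map]
  refine List.map_congr_left (fun i _ => ?_)
  have hlen : (pvPrefixes.length : Int) = 32 := by decide
  simp only [Function.comp, pvF, hlen]
  have hmod : PySem.Int.mod (i : Int) 32 = ((i % 32 : Nat) : Int) :=
    PySem.Int.mod_natCast i 32
  have hdiv : PySem.Int.floordiv (i : Int) 32 = ((i / 32 : Nat) : Int) :=
    PySem.Int.floordiv_natCast i 32
  rw [hmod, hdiv]
  rw [PySem.List.pyGet?_natCast]

theorem pvAltInner_fst (num : Int) (ps : List String) (rem : Nat) :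
    (pvAltInner num ps rem).1 =
      (List.range (min rem ps.length)).map
        (fun i => (ps[i]?.getD "") ++ PySem.Int.toStr num ++ "X") := by
  induction ps generalizing rem with
  | nil => cases rem <;> simp [pvAltInner]
  | cons p ps ih =>
    cases rem with
    | zero => simp [pvAltInner]
    | succ r =>
      simp only [pvAltInner, ih, List.length_cons, Nat.succ_min_succ,
        List.range_succ_eq_map, List.map_cons, List.map_map]
      congr 1

theorem pvAltOuter_closed (rem : Nat) (num : Int) :
    pvAltOuter rem num = (List.range rem).map (pvF num) := by
  induction rem using Nat.strong_induction_on generalizing num with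
  | _ rem ih =>
    rw [pvAltOuter]
    by_cases h : rem = 0
    · simp [h]
    · rw [if_neg h]
      show (pvAltInner num pvPrefixes rem).1 ++
          pvAltOuter (pvAltInner num pvPrefixes rem).2 (num + 1) =
        List.map (pvF num) (List.range rem)
      rw [pvAltInner_snd, pvAltInner_fst]
      have hlen : pvPrefixes.length = 32 := by decide
      rw [hlen]
      by_cases hle : rem ≤ 32
      · have h32 : rem - 32 = 0 := by omega
        have hmin : min rem 32 = rem := by omega
        rw [h32, hmin, pvAltOuter, if_pos rfl, List.append_nil]
        refine List.map_congr_left (fun i hi => ?_)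
        have hi' : i < rem := List.mem_range.mp hi
        have h1 : i % 32 = i := Nat.mod_eq_of_lt (by omega)
        have h2 : i / 32 = 0 := Nat.div_eq_of_lt (by omega)
        simp [pvF, h1, h2]
      · have hmin : min rem 32 = 32 := by omega
        have hsplit : rem = 32 + (rem - 32) := by omega
        rw [hmin, ih (rem - 32) (by omega) (num + 1)]
        conv_rhs => rw [hsplit, List.range_add, List.map_append, List.map_map]
        congr 1
        · refine List.map_congr_left (fun i hi => ?_)
          have hi' : i < 32 := List.mem_range.mp hi
          have h1 : i % 32 = i := Nat.mod_eq_of_lt hi'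
          have h2 : i / 32 = 0 := Nat.div_eq_of_lt hi'
          simp [pvF, h1, h2]
        · refine List.map_congr_left (fun i _ => ?_)
          simp only [Function.comp, pvF]
          have h1 : (32 + i) % 32 = i % 32 := by omega
          have h2 : (32 + i) / 32 = i / 32 + 1 := by omega
          have h3 : ((i / 32 + 1 : Nat) : Int) + num = ((i / 32 : Nat) : Int) + (num + 1) := by
            push_cast; ring
          rw [h1, h2, h3]

-- ===== VERDICT (by name: the statement is the Claim_ definition above) =====
theorem make_gene_symbols_spec : Claim_equal_make_gene_symbols := by
  intro n _
  unfold Spec_make_gene_symbols make_gene_symbols_alt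
  rw [pvA_closed]
  by_cases h : n ≤ 0
  · have : n.toNat = 0 := by omega
    simp [h, this]
  · simp only [h, ite_false]
    rw [pvAltOuter_closed]
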